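-- pv_equiv track=rewrite | github.com/Young19ermi/Competitive_programming | B_Maximum_Multiple_Sum.py | solve
-- ===== SOURCE A (Python) =====
-- def solve(n):
--     possiblity = list(range(2,n+1))
--     res = []
--     used = [0]
--     tot = sum(used)
--     output = 0
--     for i in range(len(possiblity)):
--
--         used.append(possiblity[i])
--         tot += possiblity[i]
--         if tot == possiblity[i]:
--             output += 1
--             continue
--         else:
--             for n in used:
--                 if tot - n == possiblity[i]:
--                     output += 1
--                     continue
--     return output
-- ===== SOURCE B (Python) =====
-- def solve(n):
--     # Closed form: the buggy running-sum check succeeds exactly once for n == 2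
--     # (2 == 2) and exactly twice for n >= 3 (also at 3: 2+3-2 == 3); never after.
--     if n < 2:
--         return 0
--     if n == 2:
--         return 1
--     return 2
-- ===== Notes on version B (the rewrite author's own statement) =====
-- stated objective: faster
-- what changed: Replaced the O(n^2) double loop over the running list with a three-case closed form (0 if n<2, 1 if n==2, 2 otherwise), proved equal by a loop invariant showing the check never fires after the first two elements.
import Mathlib
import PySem

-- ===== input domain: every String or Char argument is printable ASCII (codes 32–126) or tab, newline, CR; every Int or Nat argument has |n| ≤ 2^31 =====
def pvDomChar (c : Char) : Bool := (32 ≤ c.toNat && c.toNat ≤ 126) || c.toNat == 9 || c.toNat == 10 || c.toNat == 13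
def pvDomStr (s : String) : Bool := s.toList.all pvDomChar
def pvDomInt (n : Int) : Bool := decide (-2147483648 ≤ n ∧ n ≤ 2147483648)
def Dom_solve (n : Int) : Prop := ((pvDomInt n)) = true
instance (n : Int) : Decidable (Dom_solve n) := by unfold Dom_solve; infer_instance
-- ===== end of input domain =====

-- One line: B replaces A's O(n^2) double loop with the proved three-case closed form (faster).

-- ===== PORT A =====
-- loop body of 'for i in range(len(possiblity))'; state (used, tot, output)
def solveStep (s : List Int × Int × Int) (p : Int) : List Int × Int × Int :=
  let used := s.1 ++ [p]
  let tot := s.2.1 + p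
  if tot == p then (used, tot, s.2.2 + 1)
  else (used, tot, used.foldl (fun o m => if tot - m == p then o + 1 else o) s.2.2)

def solve (n : Int) : Int :=
  let possiblity := PySem.List.pyRange 2 (n + 1) 1
  let used : List Int := [0]
  let tot : Int := used.sum
  let output : Int := 0
  let st := (PySem.List.pyRange 0 (possiblity.length : Int) 1).foldl
    (fun s i => solveStep s (PySem.List.pyGetD possiblity i 0)) (used, tot, output)
  st.2.2

-- ===== PORT B =====
def solve_alt (n : Int) : Int :=
  if n < 2 then 0 else if n == 2 then 1 else 2

-- ===== PRECONDITION & SPEC =====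
def Spec_solve (n : Int) (out : Int) : Prop := out = solve_alt n
instance (n : Int) (out : Int) : Decidable (Spec_solve n out) := by unfold Spec_solve; infer_instance

-- ===== CLAIM (what is proved, stated in full; the proofs are below) =====
def Claim_equal_solve : Prop := ∀ (n : Int), Dom_solve n → Spec_solve n (solve n)

-- ===== LEMMAS AND PROOFS =====

-- the inner 'for n in used' loop adds nothing when no element matches
theorem inner_noop (c p : Int) : ∀ (l : List Int) (out : Int),
    (∀ m ∈ l, c - m ≠ p) →
    l.foldl (fun o m => if c - m == p then o + 1 else o) out = out := by
  intro l
  induction l with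
  | nil => intro out _; rfl
  | cons x xs ih =>
    intro out h
    simp only [List.foldl]
    rw [if_neg (by simpa using h x (List.mem_cons_self ..))]
    exact ih out (fun m hm => h m (List.mem_cons_of_mem _ hm))

-- After the first two iterations the success-condition can never fire again:
-- with all of `used` below `tot` and 0 < k < tot, each step leaves `output` untouched.
theorem solve_tail (b : Int) : ∀ (k : Int) (used : List Int) (tot out : Int),
    (∀ m ∈ used, m < tot) → 0 < k → k < tot →
    ((PySem.List.pyRange k b 1).foldl solveStep (used, tot, out)).2.2 = out := by
  have H : ∀ (fuel : Nat) (k : Int), (b - k).toNat ≤ fuel →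
      ∀ (used : List Int) (tot out : Int),
      (∀ m ∈ used, m < tot) → 0 < k → k < tot →
      ((PySem.List.pyRange k b 1).foldl solveStep (used, tot, out)).2.2 = out := by
    intro fuel
    induction fuel with
    | zero =>
      intro k hk used tot out _ _ _
      have hb : b ≤ k := by omega
      rw [PySem.List.pyRange_one_eq_nil hb]
      simp [List.foldl]
    | succ f ih =>
      intro k hk used tot out hused hk0 hktot
      by_cases hkb : k < b
      · rw [PySem.List.pyRange_one_cons hkb]
        simp only [List.foldl]
        have hstep : solveStep (used, tot, out) k
            = (used ++ [k], tot + k, out) := by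
          unfold solveStep
          have hne : (tot + k == k) = false := by
            simp only [beq_eq_false_iff_ne]; omega
          simp only [hne]
          refine if_neg (by simp) |>.trans ?_
          congr 1
          congr 1
          apply inner_noop
          intro m hm
          rcases List.mem_append.mp hm with h | h
          · have := hused m h; omega
          · simp only [List.mem_singleton] at h; omega
        rw [hstep]
        apply ih (k + 1) (by omega)
        · intro m hm
          rcases List.mem_append.mp hm with h | h
          · have := hused m h; omega
          · simp only [List.mem_singleton] at h; omega
        · omega
        · omega
      · rw [PySem.List.pyRange_one_eq_nil (by omega)]
        simp [List.foldl]
  intro k used tot out h1 h2 h3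
  exact H (b - k).toNat k le_rfl used tot out h1 h2 h3

theorem solve_eq (n : Int) : solve n = solve_alt n := by
  unfold solve
  simp only []
  rw [PySem.List.foldl_pyRange_zero_pyGetD' (PySem.List.pyRange 2 (n + 1) 1) 0
        solveStep ([(0 : Int)], [(0 : Int)].sum, (0 : Int))]
  by_cases h2 : n < 2
  · rw [PySem.List.pyRange_one_eq_nil (by omega)]
    simp [solve_alt, h2]
  · by_cases h3 : n = 2
    · subst h3; decide
    · -- n ≥ 3
      have hn3 : 3 ≤ n := by omega
      rw [PySem.List.pyRange_one_cons (show (2:Int) < n + 1 by omega),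
          show (2:Int) + 1 = 3 from rfl,
          PySem.List.pyRange_one_cons (show (3:Int) < n + 1 by omega),
          show (3:Int) + 1 = 4 from rfl]
      simp only [List.foldl]
      have s1 : solveStep ([(0 : Int)], [(0 : Int)].sum, (0 : Int)) 2
          = ([0, 2], 2, 1) := by decide
      have s2 : solveStep ([(0 : Int), 2], (2 : Int), (1 : Int)) 3
          = ([0, 2, 3], 5, 2) := by decide
      rw [s1, s2, solve_tail (n + 1) 4 [0, 2, 3] 5 2 (by decide) (by decide) (by decide)]
      simp [solve_alt]
      omega

-- ===== VERDICT (by name: the statement is the Claim_ definition above) =====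
theorem solve_spec : Claim_equal_solve := by
  intro n _
  unfold Spec_solve
  exact solve_eq n
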